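-- pv_equiv track=rewrite | github.com/gzavlanis/myFirstProject | excercises_3.py | KaprekarsConstant
-- ===== SOURCE A (Python) =====
-- def KaprekarsConstant(num):
--     if len(str(num)) < 4:
--         num = num * 10 ** (4 - len(str(num)))
--     ascList = list(map(str, str(num)))
--     desList = list(map(str, str(num)))
--     ascList.sort()
--     desList.sort(reverse = True)
--     number = int(''.join(desList)) - int(''.join(ascList))
--     if number == 6174:
--         return 1
--     else:
--         return 1 + KaprekarsConstant(number)
-- ===== SOURCE B (Python) =====
-- def KaprekarsConstant(num):
--     # Iterative: left-pad with zfill (same digit multiset as A's pad-by-multiplication),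
--     # one sorted() per pass, running counter instead of recursion.
--     count = 0
--     n = num
--     while True:
--         digits = sorted(str(n).zfill(4))
--         n = int(''.join(reversed(digits))) - int(''.join(digits))
--         count += 1
--         if n == 6174:
--             return count
-- ===== Notes on version B (the rewrite author's own statement) =====
-- stated objective: simpler
-- what changed: Recursion replaced by a while loop with a running counter; the pad-by-multiplication and double list sort are replaced by one zfill plus one sorted() whose reverse gives the descending digits.
-- outside the precondition, e.g. on KaprekarsConstant(0): A raises RecursionError, B does not finish within the time limit; on KaprekarsConstant(1111): A raises RecursionError, B does not finish within the time limit; on KaprekarsConstant(10000): A raises RecursionError, B does not finish within the time limit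
import Mathlib
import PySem

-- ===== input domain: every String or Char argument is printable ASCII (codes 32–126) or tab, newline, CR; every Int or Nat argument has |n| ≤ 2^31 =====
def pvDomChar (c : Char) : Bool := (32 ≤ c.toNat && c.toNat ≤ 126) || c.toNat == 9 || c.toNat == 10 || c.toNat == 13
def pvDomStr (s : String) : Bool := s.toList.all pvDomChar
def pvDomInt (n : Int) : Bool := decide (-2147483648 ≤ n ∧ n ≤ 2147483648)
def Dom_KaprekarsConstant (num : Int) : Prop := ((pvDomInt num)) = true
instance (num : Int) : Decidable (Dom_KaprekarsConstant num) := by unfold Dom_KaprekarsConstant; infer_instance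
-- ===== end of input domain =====

-- B replaces A's recursion by a while loop with a running counter and one sorted zfill'ed
-- digit string per pass (objective: simpler).


-- ===== PORT A =====
-- A's unbounded recursion is modelled with fuel; 8 exceeds the maximal recursion depth (7)
-- reached on any input admitted by Pre_, so the fuel guard is never hit there (proved below).
-- `none` = fuel exhausted or int() raised. Python sorts the 1-char strings str maps the digit
-- characters to; sorting the characters themselves is the same order.
def KaprekarAuxA : Nat → Int → Option Int
  | 0, _ => none
  | fuel+1, num =>
    let num := if (PySem.Int.toChars num).length < 4
               then num * 10 ^ (4 - (PySem.Int.toChars num).length) else num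
    let ascList := PySem.List.sorted (PySem.Int.toChars num) (fun c => c) false
    let desList := PySem.List.sorted (PySem.Int.toChars num) (fun c => c) true
    match PySem.Int.ofChars? desList, PySem.Int.ofChars? ascList with
    | some d, some a =>
      let number := d - a
      if number = 6174 then some 1 else (KaprekarAuxA fuel number).map (fun r => 1 + r)
    | _, _ => none

def KaprekarsConstant (num : Int) : Int := (KaprekarAuxA 8 num).getD 0

-- ===== PORT B =====
-- Source B's while loop, with the same fuel bound; count is the running counter.
def kaprekarLoopB : Nat → Int → Int → Int
  | 0, _, count => count
  | fuel+1, n, count =>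
    let digits := PySem.List.sorted (PySem.Chars.zfill (PySem.Int.toChars n) 4) (fun c => c) false
    let n' := (PySem.Int.ofChars? digits.reverse).getD 0 - (PySem.Int.ofChars? digits).getD 0
    let count' := count + 1
    if n' = 6174 then count' else kaprekarLoopB fuel n' count'

def KaprekarsConstant_alt (num : Int) : Int := kaprekarLoopB 8 num 0

-- ===== PRECONDITION & SPEC =====
-- Pre_ is exactly where the Python A returns: 1..9999 without the multiples of 1111 (the
-- repdigits). Everywhere else A raises: RecursionError on 0, on repdigits and on every
-- num ≥ 10000 (the routine never reaches 6174 there), ValueError on negative num.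
def Pre_KaprekarsConstant (num : Int) : Prop := 1 ≤ num ∧ num ≤ 9999 ∧ ¬ (num % 1111 = 0)
instance (num : Int) : Decidable (Pre_KaprekarsConstant num) := by unfold Pre_KaprekarsConstant; infer_instance
def pvWitness_KaprekarsConstant : Int := 2025

def Spec_KaprekarsConstant (num : Int) (out : Int) : Prop := out = KaprekarsConstant_alt num
instance (num : Int) (out : Int) : Decidable (Spec_KaprekarsConstant num out) := by unfold Spec_KaprekarsConstant; infer_instance

-- ===== CLAIM (what is proved, stated in full; the proofs are below) =====
def Claim_equal_KaprekarsConstant : Prop := ∀ (num : Int), Dom_KaprekarsConstant num → Pre_KaprekarsConstant num → Spec_KaprekarsConstant num (KaprekarsConstant num)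

-- ===== LEMMAS AND PROOFS =====

-- The step both programs take each pass: A's (none where int() would raise) and B's.
def stepA? (num : Int) : Option Int :=
    let num := if (PySem.Int.toChars num).length < 4
               then num * 10 ^ (4 - (PySem.Int.toChars num).length) else num
    let ascList := PySem.List.sorted (PySem.Int.toChars num) (fun c => c) false
    let desList := PySem.List.sorted (PySem.Int.toChars num) (fun c => c) true
    match PySem.Int.ofChars? desList, PySem.Int.ofChars? ascList with
    | some d, some a => some (d - a)
    | _, _ => none

def stepB (n : Int) : Int :=
    let digits := PySem.List.sorted (PySem.Chars.zfill (PySem.Int.toChars n) 4) (fun c => c) false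
    (PySem.Int.ofChars? digits.reverse).getD 0 - (PySem.Int.ofChars? digits).getD 0

theorem kapHelp (fuel : Nat) (od oa : Option Int) :
    (match od, oa with
     | some d, some a =>
       if d - a = 6174 then some 1 else Option.map (fun r => 1 + r) (KaprekarAuxA fuel (d - a))
     | _, _ => (none : Option Int)) =
    (match (match od, oa with | some d, some a => some (d - a) | _, _ => none) with
     | some number => if number = 6174 then some 1 else Option.map (fun r => 1 + r) (KaprekarAuxA fuel number)
     | none => none) := by
  cases od <;> cases oa <;> rfl

theorem auxA_succ (fuel : Nat) (num : Int) : KaprekarAuxA (fuel+1) num =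
    (match stepA? num with
     | some number => if number = 6174 then some 1 else (KaprekarAuxA fuel number).map (fun r => 1 + r)
     | none => none) := by
  simp only [KaprekarAuxA, stepA?]
  exact kapHelp fuel _ _

theorem loopB_succ (fuel : Nat) (n count : Int) : kaprekarLoopB (fuel+1) n count =
    (if stepB n = 6174 then count + 1 else kaprekarLoopB fuel (stepB n) (count + 1)) := by
  simp only [kaprekarLoopB, stepB]

theorem toDigitsCore_eq (f : Nat) : ∀ (n : Nat) (acc : List Char), n < f → 0 < n →
    Nat.toDigitsCore 10 f n acc = ((Nat.digits 10 n).map Nat.digitChar).reverse ++ acc := by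
  induction f with
  | zero => intro n acc h; omega
  | succ f ih =>
    intro n acc h hn
    rw [Nat.digits_def' (by norm_num : (1:Nat) < 10) hn]
    simp only [Nat.toDigitsCore]
    by_cases h10 : n / 10 = 0
    · simp [h10]
    · rw [if_neg h10, ih (n / 10) _ (by omega) (by omega)]
      simp

theorem toChars_nat (m : Nat) (hm : 0 < m) :
    PySem.Int.toChars (m : Int) = ((Nat.digits 10 m).map Nat.digitChar).reverse := by
  simp only [PySem.Int.toChars]
  rw [if_neg (by omega)]
  show Nat.toDigits 10 (Int.toNat m) = _
  simp only [Int.toNat_natCast, Nat.toDigits]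
  rw [toDigitsCore_eq (m+1) m [] (by omega) hm]
  simp

theorem digits_mul_pow (m k : Nat) (hm : 0 < m) :
    Nat.digits 10 (m * 10 ^ k) = List.replicate k 0 ++ Nat.digits 10 m := by
  induction k with
  | zero => simp
  | succ k ih =>
    have hpos : 0 < m * 10 ^ (k+1) := by positivity
    rw [Nat.digits_def' (by norm_num : (1:Nat) < 10) hpos]
    have h1 : m * 10 ^ (k+1) % 10 = 0 := by
      have : m * 10 ^ (k+1) = (m * 10 ^ k) * 10 := by ring
      omega
    have h2 : m * 10 ^ (k+1) / 10 = m * 10 ^ k := by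
      have : m * 10 ^ (k+1) = (m * 10 ^ k) * 10 := by ring
      omega
    rw [h1, h2, ih]
    simp [List.replicate_succ]

theorem digitChar_mono : ∀ j < 10, ∀ k < 10, j ≤ k → (Nat.digitChar j ≤ Nat.digitChar k) := by decide
theorem digitChar_not_sign : ∀ j < 10, ¬ (Nat.digitChar j = '+' ∨ Nat.digitChar j = '-') := by decide

theorem ofChars_asc_b : ((List.range 10).all fun a => (List.range 10).all fun b =>
    (List.range 10).all fun c => (List.range 10).all fun d =>
      !(a ≤ b && b ≤ c && c ≤ d) ||
      (PySem.Int.ofChars? [Nat.digitChar a, Nat.digitChar b, Nat.digitChar c, Nat.digitChar d]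
        == some ((1000*a+100*b+10*c+d : Nat) : Int))) = true := by decide

theorem ofChars_desc_b : ((List.range 10).all fun a => (List.range 10).all fun b =>
    (List.range 10).all fun c => (List.range 10).all fun d =>
      !(a ≤ b && b ≤ c && c ≤ d) ||
      (PySem.Int.ofChars? [Nat.digitChar d, Nat.digitChar c, Nat.digitChar b, Nat.digitChar a]
        == some ((1000*d+100*c+10*b+a : Nat) : Int))) = true := by decide

theorem ofChars_of_b
    (f : Nat → Nat → Nat → Nat → Bool)
    (hb : ((List.range 10).all fun a => (List.range 10).all fun b =>
      (List.range 10).all fun c => (List.range 10).all fun d =>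
      !(a ≤ b && b ≤ c && c ≤ d) || f a b c d) = true)
    (a b c d : Nat) (ha : a < 10) (hb10 : b < 10) (hc : c < 10) (hd : d < 10)
    (hab : a ≤ b) (hbc : b ≤ c) (hcd : c ≤ d) : f a b c d = true := by
  simp only [List.all_eq_true, List.mem_range] at hb
  have := hb a ha b hb10 c hc d hd
  simpa [hab, hbc, hcd] using this

theorem ofChars_asc : ∀ a < 10, ∀ b < 10, ∀ c < 10, ∀ d < 10, a ≤ b → b ≤ c → c ≤ d →
    PySem.Int.ofChars? [Nat.digitChar a, Nat.digitChar b, Nat.digitChar c, Nat.digitChar d]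
      = some ((1000*a+100*b+10*c+d : Nat) : Int) := by
  intro a ha b hb c hc d hd hab hbc hcd
  exact eq_of_beq (ofChars_of_b _ ofChars_asc_b a b c d ha hb hc hd hab hbc hcd)

theorem ofChars_desc : ∀ a < 10, ∀ b < 10, ∀ c < 10, ∀ d < 10, a ≤ b → b ≤ c → c ≤ d →
    PySem.Int.ofChars? [Nat.digitChar d, Nat.digitChar c, Nat.digitChar b, Nat.digitChar a]
      = some ((1000*d+100*c+10*b+a : Nat) : Int) := by
  intro a ha b hb c hc d hd hab hbc hcd
  exact eq_of_beq (ofChars_of_b _ ofChars_desc_b a b c d ha hb hc hd hab hbc hcd)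

theorem list_len4 {α : Type} (l : List α) (h : l.length = 4) :
    ∃ a b c d : α, l = [a, b, c, d] := by
  match l, h with
  | [a, b, c, d], _ => exact ⟨a, b, c, d, rfl⟩

theorem step_eq (m : Nat) (h1 : 1 ≤ m) (h2 : m ≤ 9999) :
    ∃ a b c d : Nat, a ≤ b ∧ b ≤ c ∧ c ≤ d ∧ d < 10 ∧
      stepA? (m : Int) = some (stepB (m : Int)) ∧
      stepB (m : Int) = 999 * ((d : Int) - a) + 90 * ((c : Int) - b) ∧
      (a = d → m % 1111 = 0) := by
  classical
  set L := Nat.digits 10 m with hL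
  have hb : (1:Nat) < 10 := by norm_num
  have hLne : L ≠ [] := Nat.digits_ne_nil_iff_ne_zero.mpr (by omega)
  have hlen4 : L.length ≤ 4 := (Nat.digits_length_le_iff hb m).mpr (by omega)
  have hlen1 : 1 ≤ L.length := List.length_pos_of_ne_nil hLne
  have hLlt : ∀ x ∈ L, x < 10 := fun x hx => Nat.digits_lt_base hb hx
  set k := 4 - L.length with hk
  have hchars : PySem.Int.toChars (m : Int) = L.reverse.map Nat.digitChar := by
    rw [toChars_nat m (by omega), ← hL]; simp
  have hcharslen : (PySem.Int.toChars (m : Int)).length = L.length := by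
    rw [hchars]; simp
  -- A's padded character list
  have hpadA : PySem.Int.toChars ((m : Int) * 10 ^ k) =
      L.reverse.map Nat.digitChar ++ List.replicate k '0' := by
    have : ((m : Int) * 10 ^ k) = ((m * 10 ^ k : Nat) : Int) := by push_cast; ring
    rw [this, toChars_nat _ (by positivity), digits_mul_pow m k (by omega), ← hL]
    simp
    exact Or.inr rfl
  -- A's padding conditional
  have hifA : PySem.Int.toChars (if (PySem.Int.toChars (m:Int)).length < 4
        then (m:Int) * 10 ^ (4 - (PySem.Int.toChars (m:Int)).length) else (m:Int)) =
      L.reverse.map Nat.digitChar ++ List.replicate k '0' := by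
    rw [hcharslen]
    by_cases h : L.length < 4
    · rw [if_pos h, show 4 - L.length = k from rfl]
      exact hpadA
    · have hk0 : k = 0 := by omega
      rw [if_neg h, hchars, hk0]
      simp
  -- B's zfill
  have hzfill : PySem.Chars.zfill (PySem.Int.toChars (m:Int)) 4 =
      List.replicate k '0' ++ L.reverse.map Nat.digitChar := by
    rw [hchars]
    simp only [PySem.Chars.zfill]
    by_cases h : (4:Int) ≤ (L.reverse.map Nat.digitChar).length
    · rw [if_pos h]
      have hk0 : k = 0 := by simp at h; omega
      rw [hk0]; simp
    · rw [if_neg h]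
      cases hrm : L.reverse.map Nat.digitChar with
      | nil => simp at hrm; exact absurd (by simpa using hrm) hLne
      | cons c rest =>
        have hcmem : c ∈ L.reverse.map Nat.digitChar := by rw [hrm]; simp
        obtain ⟨v, hv, hvc⟩ := List.mem_map.mp hcmem
        have hv10 : v < 10 := hLlt v (List.mem_reverse.mp hv)
        have hns : ¬ (c = '+' ∨ c = '-') := by rw [← hvc]; exact digitChar_not_sign v hv10
        have hlenc : (c :: rest).length = L.length := by rw [← hrm]; simp
        change (if c = '+' ∨ c = '-' then c :: (List.replicate (Int.toNat 4 - (c :: rest).length) '0' ++ rest)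
          else List.replicate (Int.toNat 4 - (c :: rest).length) '0' ++ c :: rest) = _
        rw [if_neg hns, hlenc, show Int.toNat 4 = 4 from rfl, ← hk, ← hrm]
  -- the multiset of padded digit values, sorted
  set P : List Nat := List.replicate k 0 ++ L with hP
  have hPlen : P.length = 4 := by rw [hP]; simp; omega
  have hPlt : ∀ x ∈ P, x < 10 := by
    intro x hx
    rcases List.mem_append.mp hx with h | h
    · have := List.eq_of_mem_replicate h; omega
    · exact hLlt x h
  set VS := PySem.List.sorted P (fun v => v) false with hVS
  have hVSperm : VS.Perm P := PySem.List.sorted_perm P _ false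
  have hVSlen : VS.length = 4 := by rw [hVSperm.length_eq, hPlen]
  have hVSlt : ∀ x ∈ VS, x < 10 := fun x hx => hPlt x ((PySem.List.mem_sorted P _ false x).mp hx)
  have hVSpw : VS.Pairwise (fun a b => a ≤ b) := PySem.List.sorted_pairwise P (fun v => v)
  obtain ⟨a, b, c, d, hV4⟩ : ∃ a b c d : Nat, VS = [a, b, c, d] := list_len4 VS hVSlen
  have hab : a ≤ b := by
    have := hV4 ▸ hVSpw; simp [List.pairwise_cons] at this; omega
  have hbc : b ≤ c := by
    have := hV4 ▸ hVSpw; simp [List.pairwise_cons] at this; omega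
  have hcd : c ≤ d := by
    have := hV4 ▸ hVSpw; simp [List.pairwise_cons] at this; omega
  have ha10 : a < 10 := hVSlt a (by rw [hV4]; simp)
  have hb10 : b < 10 := hVSlt b (by rw [hV4]; simp)
  have hc10 : c < 10 := hVSlt c (by rw [hV4]; simp)
  have hd10 : d < 10 := hVSlt d (by rw [hV4]; simp)
  -- sorting A's and B's character lists
  have hinj : Function.Injective (fun c : Char => c) := fun x y h => h
  have hpermAB : (L.reverse.map Nat.digitChar ++ List.replicate k '0').Perm
      (List.replicate k '0' ++ L.reverse.map Nat.digitChar) := List.perm_append_comm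
  have hsortAB : PySem.List.sorted (L.reverse.map Nat.digitChar ++ List.replicate k '0') (fun c => c) false
      = PySem.List.sorted (List.replicate k '0' ++ L.reverse.map Nat.digitChar) (fun c => c) false :=
    PySem.List.sorted_eq_sorted_of_perm _ _ _ hinj hpermAB
  have hCBmap : List.replicate k '0' ++ L.reverse.map Nat.digitChar
      = (List.replicate k 0 ++ L.reverse).map Nat.digitChar := by
    simp
    exact Or.inr rfl
  have hQperm : VS.Perm (List.replicate k 0 ++ L.reverse) :=
    hVSperm.trans ((List.reverse_perm L).symm.append_left (List.replicate k 0))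
  have hSB : PySem.List.sorted (List.replicate k '0' ++ L.reverse.map Nat.digitChar) (fun c => c) false
      = VS.map Nat.digitChar := by
    refine List.Perm.eq_of_pairwise (le := fun x y : Char => x ≤ y)
      (fun x y _ _ h1 h2 => le_antisymm h1 h2)
      (PySem.List.sorted_pairwise _ (fun c => c))
      (List.pairwise_map.mpr (hVSpw.imp_of_mem ?_)) ?_
    · intro x y hx hy hxy
      exact digitChar_mono x (hVSlt x hx) y (hVSlt y hy) hxy
    · refine (PySem.List.sorted_perm _ _ _).trans ?_
      rw [hCBmap]
      exact ((hQperm.map Nat.digitChar).symm)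
  have hDA : PySem.List.sorted (L.reverse.map Nat.digitChar ++ List.replicate k '0') (fun c => c) true
      = (PySem.List.sorted (List.replicate k '0' ++ L.reverse.map Nat.digitChar) (fun c => c) false).reverse := by
    refine List.Perm.eq_of_pairwise (le := fun x y : Char => y ≤ x)
      (fun x y _ _ h1 h2 => le_antisymm h2 h1)
      (PySem.List.sorted_pairwise_rev _ (fun c => c))
      (List.pairwise_reverse.mpr (PySem.List.sorted_pairwise _ (fun c => c))) ?_
    refine (PySem.List.sorted_perm _ _ _).trans ?_
    refine hpermAB.trans ?_
    exact ((PySem.List.sorted_perm _ _ _).symm).trans (List.reverse_perm _).symm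
  -- integer values of the sorted strings
  have hasc : PySem.Int.ofChars? (VS.map Nat.digitChar) = some ((1000*a+100*b+10*c+d : Nat) : Int) := by
    rw [hV4]; exact ofChars_asc a ha10 b hb10 c hc10 d hd10 hab hbc hcd
  have hdesc : PySem.Int.ofChars? (VS.map Nat.digitChar).reverse = some ((1000*d+100*c+10*b+a : Nat) : Int) := by
    rw [hV4]; exact ofChars_desc a ha10 b hb10 c hc10 d hd10 hab hbc hcd
  refine ⟨a, b, c, d, hab, hbc, hcd, hd10, ?_, ?_, ?_⟩
  · -- stepA? = some stepB
    simp only [stepA?, stepB, hifA, hzfill, hsortAB, hSB, hDA, hasc, hdesc]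
    simp
  · -- value of stepB
    simp only [stepB, hzfill, hSB, hasc, hdesc]
    simp only [Option.getD_some]
    push_cast
    ring
  · -- repdigit case
    intro had
    have hallVS : ∀ x ∈ VS, x = a := by
      intro x hx
      rw [hV4] at hx
      simp at hx
      omega
    have hallP : ∀ x ∈ P, x = a := fun x hx => hallVS x (hVSperm.mem_iff.mpr hx)
    by_cases hk0 : k = 0
    · have hLlen : L.length = 4 := by omega
      have hallL : ∀ x ∈ L, x = a := fun x hx =>
        hallP x (by rw [hP]; exact List.mem_append.mpr (Or.inr hx))
      have hm : Nat.ofDigits 10 L = m := hL ▸ Nat.ofDigits_digits 10 m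
      obtain ⟨w, x, y, z, hLe⟩ := list_len4 L hLlen
      have hw := hallL w (by rw [hLe]; simp)
      have hx := hallL x (by rw [hLe]; simp)
      have hy := hallL y (by rw [hLe]; simp)
      have hz := hallL z (by rw [hLe]; simp)
      rw [hLe] at hm
      simp [Nat.ofDigits_cons, Nat.ofDigits_nil] at hm
      omega
    · have h0P : (0:Nat) ∈ P := by
        rw [hP]
        exact List.mem_append.mpr (Or.inl (List.mem_replicate.mpr ⟨hk0, rfl⟩))
      have ha0 : a = 0 := (hallP 0 h0P).symm
      have hlast : L.getLast hLne ≠ 0 := Nat.getLast_digit_ne_zero 10 (by omega)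
      have : L.getLast hLne = a :=
        hallP _ (by rw [hP]; exact List.mem_append.mpr (Or.inr (List.getLast_mem hLne)))
      omega


theorem step_zero : stepA? 0 = some (stepB 0) ∧ stepB 0 = 0 := by
  constructor <;> decide

-- the successor table of every Kaprekar difference 999*k1 + 90*k2 (0 < k1 ≤ 9, k2 ≤ k1),
-- and bounded reachability of 6174 inside it
def dTable : List (Int × Int) := [(999, 8991), (1089, 9621), (1998, 8082), (2088, 8532), (2178, 7443), (2997, 7173), (3087, 8352), (3177, 6354), (3267, 5265), (3996, 6264), (4086, 8172), (4176, 6174), (4266, 4176), (4356, 3087), (4995, 5355), (5085, 7992), (5175, 5994), (5265, 3996), (5355, 1998), (5445, 1089), (5994, 5355), (6084, 8172), (6174, 6174), (6264, 4176), (6354, 3087), (6444, 1998), (6534, 3087), (6993, 6264), (7083, 8352), (7173, 6354), (7263, 5265), (7353, 4176), (7443, 3996), (7533, 4176), (7623, 5265), (7992, 7173), (8082, 8532), (8172, 7443), (8262, 6354), (8352, 6174), (8442, 5994), (8532, 6174), (8622, 6354), (8712, 7443), (8991, 8082), (9081, 9621), (9171, 8532), (9261, 8352), (9351, 8172), (9441,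 7992), (9531, 8172), (9621, 8352), (9711, 8532), (9801, 9621)]

def brB : Int → Nat → Bool
  | _, 0 => false
  | m, j+1 =>
    match dTable.lookup m with
    | some v => (v == 6174) || brB v j
    | none => false

set_option maxRecDepth 10000 in
theorem table_step : ∀ p ∈ dTable, stepB p.1 = p.2 := by decide

theorem table_bounds : ∀ p ∈ dTable, 1 ≤ p.1 ∧ p.1 ≤ 9999 := by decide

theorem table_reach_b : ((List.range 10).all fun k1 => (List.range 10).all fun k2 =>
    !(1 ≤ k1 && k2 ≤ k1) || brB (999 * (k1:Int) + 90 * k2) 7) = true := by decide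

theorem table_reach (k1 k2 : Nat) (h1 : k1 < 10) (h2 : 1 ≤ k1) (h3 : k2 ≤ k1) :
    brB (999 * (k1:Int) + 90 * k2) 7 = true := by
  have h := table_reach_b
  simp only [List.all_eq_true, List.mem_range] at h
  have := h k1 h1 k2 (by omega)
  simpa [h2, h3] using this

theorem lookup_mem {l : List (Int × Int)} {m v : Int} (h : l.lookup m = some v) : (m, v) ∈ l := by
  induction l with
  | nil => simp [List.lookup] at h
  | cons p t ih =>
    obtain ⟨k, w⟩ := p
    by_cases hk : k = m
    · subst hk
      simp [List.lookup] at h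
      subst h
      exact List.mem_cons_self
    · rw [List.lookup] at h
      rw [show (m == k) = false from beq_eq_false_iff_ne.mpr (fun e => hk e.symm)] at h
      exact List.mem_cons_of_mem _ (ih h)

theorem step_some (n : Int) (h0 : 0 ≤ n) (h9 : n ≤ 9999) : stepA? n = some (stepB n) := by
  by_cases hz : n = 0
  · rw [hz]; exact step_zero.1
  · obtain ⟨m, rfl⟩ : ∃ m : Nat, n = (m : Int) := ⟨n.toNat, (Int.toNat_of_nonneg h0).symm⟩
    obtain ⟨a, b, c, d, _, _, _, _, hstep, _, _⟩ :=
      step_eq m (by omega) (by exact_mod_cast h9)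
    exact hstep

theorem step_bounds (n : Int) (h0 : 0 ≤ n) (h9 : n ≤ 9999) : 0 ≤ stepB n ∧ stepB n ≤ 9999 := by
  by_cases hz : n = 0
  · rw [hz, step_zero.2]; omega
  · obtain ⟨m, rfl⟩ : ∃ m : Nat, n = (m : Int) := ⟨n.toNat, (Int.toNat_of_nonneg h0).symm⟩
    obtain ⟨a, b, c, d, hab, hbc, hcd, hd10, _, hval, _⟩ :=
      step_eq m (by omega) (by exact_mod_cast h9)
    rw [hval]
    have : (a:Int) ≤ b ∧ (b:Int) ≤ c ∧ (c:Int) ≤ d ∧ (d:Int) < 10 := by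
      refine ⟨?_, ?_, ?_, ?_⟩ <;> exact_mod_cast (by omega : _)
    omega

theorem aux_some : ∀ (j : Nat) (m : Int), brB m j = true → (KaprekarAuxA j m).isSome := by
  intro j
  induction j with
  | zero => intro m h; simp [brB] at h
  | succ j ih =>
    intro m h
    rw [brB] at h
    cases hlk : dTable.lookup m with
    | none => rw [hlk] at h; simp at h
    | some v =>
      rw [hlk] at h
      have hmem : (m, v) ∈ dTable := lookup_mem hlk
      have hsv : stepB m = v := table_step (m, v) hmem
      have hbnd := table_bounds (m, v) hmem
      rw [auxA_succ, step_some m (by omega) (by omega), hsv]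
      show (if v = 6174 then some 1 else (KaprekarAuxA j v).map (fun r => 1 + r)).isSome = true
      by_cases h6 : v = 6174
      · simp [h6]
      · rw [if_neg h6]
        have h' : (v == 6174 || brB v j) = true := h
        have : brB v j = true := by
          rcases Bool.or_eq_true_iff.mp h' with h'' | h''
          · exact absurd (eq_of_beq h'') h6
          · exact h''
        simpa using (ih v this)

theorem bridge : ∀ (fuel : Nat) (n r count : Int), 0 ≤ n → n ≤ 9999 →
    KaprekarAuxA fuel n = some r → kaprekarLoopB fuel n count = count + r := by
  intro fuel
  induction fuel with
  | zero => intro n r count _ _ hA; simp [KaprekarAuxA] at hA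
  | succ fuel ih =>
    intro n r count h0 h9 hA
    rw [auxA_succ, step_some n h0 h9] at hA
    have hA' : (if stepB n = 6174 then some 1
        else (KaprekarAuxA fuel (stepB n)).map (fun r => 1 + r)) = some r := hA
    clear hA
    rw [loopB_succ]
    by_cases h6 : stepB n = 6174
    · rw [if_pos h6]
      rw [if_pos h6] at hA'
      have : r = 1 := by simpa using hA'.symm
      omega
    · rw [if_neg h6]
      rw [if_neg h6] at hA'
      obtain ⟨r', hr', hrr⟩ := Option.map_eq_some_iff.mp hA'
      obtain ⟨hb0, hb9⟩ := step_bounds n h0 h9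
      rw [ih (stepB n) r' (count + 1) hb0 hb9 hr']
      omega

theorem term (num : Int) (h : Pre_KaprekarsConstant num) : (KaprekarAuxA 8 num).isSome := by
  obtain ⟨h1, h2, h3⟩ := h
  obtain ⟨m, rfl⟩ : ∃ m : Nat, num = (m : Int) := ⟨num.toNat, (Int.toNat_of_nonneg (by omega)).symm⟩
  obtain ⟨a, b, c, d, hab, hbc, hcd, hd10, hstep, hval, hrep⟩ :=
    step_eq m (by omega) (by exact_mod_cast h2)
  have hm1111 : ¬ (m % 1111 = 0) := by
    intro he
    apply h3
    omega
  have had : a < d := by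
    rcases Nat.lt_or_ge a d with h | h
    · exact h
    · exact absurd (hrep (by omega)) hm1111
  rw [auxA_succ, hstep]
  show (if stepB (m:Int) = 6174 then some 1
      else (KaprekarAuxA 7 (stepB (m:Int))).map (fun r => 1 + r)).isSome = true
  by_cases h6 : stepB (m : Int) = 6174
  · simp [h6]
  · rw [if_neg h6]
    have hcast : stepB (m : Int) = 999 * ((d - a : Nat) : Int) + 90 * ((c - b : Nat) : Int) := by
      rw [hval]; push_cast [Nat.cast_sub (by omega : a ≤ d), Nat.cast_sub (by omega : b ≤ c)]; ring
    have := table_reach (d - a) (c - b) (by omega) (by omega) (by omega)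
    rw [← hcast] at this
    simpa using aux_some 7 (stepB (m : Int)) this

-- ===== VERDICT (by name: the statement is the Claim_ definition above) =====
theorem KaprekarsConstant_spec : Claim_equal_KaprekarsConstant := by
  intro num _ hpre
  unfold Spec_KaprekarsConstant KaprekarsConstant KaprekarsConstant_alt
  have h1 : (1:Int) ≤ num := hpre.1
  obtain ⟨r, hr⟩ := Option.isSome_iff_exists.mp (term num hpre)
  rw [hr, bridge 8 num r 0 (by omega) hpre.2.1 hr]
  simp
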